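-- pv_equiv track=rewrite | github.com/yrrk/Solved-LeetCode-and-DataStructure | Data Structure/HashTable/asses.py | numDuplicates
-- ===== SOURCE A (Python) =====
-- def numDuplicates(name,price,weight):
--     hasht=set()
--     item=[]
--     cnt=0
--     for i in range(len(name)):
--         item.append(name[i])
--         item.append(price[i])
--         item.append(weight[i])
--         if(tuple(item) in hasht):
--             cnt+=1
--             item=[]
--             continue
--         hasht.add(tuple(item))
--         item=[]
--     return cnt
-- ===== SOURCE B (Python) =====
-- def numDuplicates(name, price, weight):
--     keys = [(name[i], price[i], weight[i]) for i in range(len(name))]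
--     cnt = 0
--     while keys:
--         head = keys[0]
--         rest = [k for k in keys[1:] if k != head]
--         cnt += len(keys) - 1 - len(rest)
--         keys = rest
--     return cnt
-- ===== Notes on version B (the rewrite author's own statement) =====
-- stated objective: alternative
-- what changed: Replaces the seen-set membership loop with an iterative partition: repeatedly take the first key triple, filter all of its copies out of the remainder, and add the number removed; no set or dict of seen keys is maintained.
import Mathlib
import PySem

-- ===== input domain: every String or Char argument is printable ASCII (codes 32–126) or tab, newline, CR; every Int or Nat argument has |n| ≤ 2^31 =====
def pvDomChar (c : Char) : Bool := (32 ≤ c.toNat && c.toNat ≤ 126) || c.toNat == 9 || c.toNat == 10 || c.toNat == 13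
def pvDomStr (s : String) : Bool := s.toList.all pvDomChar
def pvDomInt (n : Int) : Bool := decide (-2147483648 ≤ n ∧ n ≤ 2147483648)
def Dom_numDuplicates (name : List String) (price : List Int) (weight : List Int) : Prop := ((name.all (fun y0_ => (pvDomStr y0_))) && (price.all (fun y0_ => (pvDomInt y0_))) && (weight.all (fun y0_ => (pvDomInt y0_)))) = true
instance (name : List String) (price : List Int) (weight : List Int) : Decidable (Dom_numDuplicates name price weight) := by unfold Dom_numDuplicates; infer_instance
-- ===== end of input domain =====

-- B replaces A's seen-set loop by a recursive partition (filter out each head key's copies, count the removed); return values only, no mutation involved.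

-- ===== PORT A =====
-- A builds item=[name[i],price[i],weight[i]] then takes tuple(item): ported directly as the triple.
-- Indexing name[i]/price[i]/weight[i] is PySem pyGet?; Pre_ guarantees in-range, so .getD supplies no observable default.
def numDuplicates (name : List String) (price : List Int) (weight : List Int) : Int :=
  ((PySem.List.pyRange 0 (name.length : Int) 1).foldl
    (fun (st : PySem.Set (String × Int × Int) × Int) i =>
      if st.1.contains ((PySem.List.pyGet? name i).getD "", (PySem.List.pyGet? price i).getD 0,
                        (PySem.List.pyGet? weight i).getD 0)
      then (st.1, st.2 + 1)
      else (PySem.Set.add st.1 ((PySem.List.pyGet? name i).getD "", (PySem.List.pyGet? price i).getD 0,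
                                (PySem.List.pyGet? weight i).getD 0), st.2))
    (PySem.Set.empty, 0)).2

-- ===== PORT B =====
-- B's while loop: take the first key, drop every copy of it from the tail, add the number dropped.
def pvLoopB (ks : List (String × Int × Int)) (cnt : Int) : Int :=
  match ks with
  | [] => cnt
  | h :: t =>
      pvLoopB (t.filter (fun k => k != h))
        (cnt + (((h :: t).length : Int) - 1 - ((t.filter (fun k => k != h)).length : Int)))
termination_by ks.length
decreasing_by
  simp only [List.length_unattach, List.length_cons]
  exact Nat.lt_succ_of_le ((List.length_filter_le _ _).trans (by simp))

def numDuplicates_alt (name : List String) (price : List Int) (weight : List Int) : Int :=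
  pvLoopB ((PySem.List.pyRange 0 (name.length : Int) 1).map
    (fun i => ((PySem.List.pyGet? name i).getD "", (PySem.List.pyGet? price i).getD 0,
               (PySem.List.pyGet? weight i).getD 0))) 0

-- ===== PRECONDITION & SPEC =====
-- Pre_ excludes only the inputs where price or weight is shorter than name: there A raises IndexError (B too).
def Pre_numDuplicates (name : List String) (price : List Int) (weight : List Int) : Prop :=
  name.length ≤ price.length ∧ name.length ≤ weight.length
instance (name : List String) (price : List Int) (weight : List Int) : Decidable (Pre_numDuplicates name price weight) := by unfold Pre_numDuplicates; infer_instance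
def pvWitness_numDuplicates : List String × List Int × List Int := (["a", "b", "a"], [1, 2, 1], [3, 4, 3])

def Spec_numDuplicates (name : List String) (price : List Int) (weight : List Int) (out : Int) : Prop := out = numDuplicates_alt name price weight
instance (name : List String) (price : List Int) (weight : List Int) (out : Int) : Decidable (Spec_numDuplicates name price weight out) := by unfold Spec_numDuplicates; infer_instance

-- ===== CLAIM (what is proved, stated in full; the proofs are below) =====
def Claim_equal_numDuplicates : Prop := ∀ (name : List String) (price : List Int) (weight : List Int), Dom_numDuplicates name price weight → Pre_numDuplicates name price weight → Spec_numDuplicates name price weight (numDuplicates name price weight)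

-- ===== LEMMAS AND PROOFS =====

-- A's loop invariant: the seen-set is Set.update of the keys; count + set growth = number of keys processed.
theorem pvFoldInv {α : Type} [BEq α] (l : List α) (s : PySem.Set α) (c : Int) :
    (l.foldl
      (fun (st : PySem.Set α × Int) t =>
        if st.1.contains t then (st.1, st.2 + 1) else (PySem.Set.add st.1 t, st.2))
      (s, c))
    = (PySem.Set.update s l,
       c + (l.length : Int) + (s.length : Int) - ((PySem.Set.update s l).length : Int)) := by
  induction l generalizing s c with
  | nil => simp [PySem.Set.update]
  | cons t l ih =>
    simp only [List.foldl_cons]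
    by_cases h : s.contains t = true
    · have hadd : PySem.Set.add s t = s := by
        simp [PySem.Set.add, PySem.Set.contains] at h ⊢
        simp [h]
      have hupd : PySem.Set.update s (t :: l) = PySem.Set.update s l := by
        simp [PySem.Set.update, hadd]
      rw [if_pos h, ih, hupd]
      simp [Prod.ext_iff]
      ring
    · have hadd : PySem.Set.add s t = s ++ [t] := by
        simp [PySem.Set.add, PySem.Set.contains] at h ⊢
        simp [h]
      have hupd : PySem.Set.update s (t :: l) = PySem.Set.update (s ++ [t]) l := by
        simp [PySem.Set.update, hadd]
      rw [if_neg h, ih, hadd, hupd]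
      simp [Prod.ext_iff]
      ring

-- the number of distinct elements of l is |l.toFinset|
theorem pvOfListLen {α : Type} [DecidableEq α] [BEq α] [LawfulBEq α] (l : List α) :
    (PySem.Set.ofList l).length = l.toFinset.card := by
  have hnd : (PySem.Set.ofList l).Nodup := PySem.Set.nodup_ofList l
  have hfs : (PySem.Set.ofList l).toFinset = l.toFinset := by
    apply Finset.ext; intro x
    simp [PySem.Set.mem_ofList]
  rw [← hfs, List.toFinset_card_of_nodup hnd]

-- removing every copy of the head removes exactly one distinct element
theorem pvDistinctCons {α : Type} [DecidableEq α] [BEq α] [LawfulBEq α] (h : α) (t : List α) :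
    (h :: t).toFinset.card = (t.filter (fun k => k != h)).toFinset.card + 1 := by
  have hf : (t.filter (fun k => k != h)).toFinset = t.toFinset.erase h := by
    apply Finset.ext; intro x
    simp [Finset.mem_erase, bne_iff_ne]
    tauto
  rw [hf, List.toFinset_cons]
  by_cases hm : h ∈ t.toFinset
  · rw [Finset.insert_eq_self.mpr hm, Finset.card_erase_add_one hm]
  · rw [Finset.card_insert_of_notMem hm, Finset.erase_eq_of_notMem hm]

-- B's loop computes cnt + (number of keys) - (number of distinct keys)
theorem pvLoopB_eq (ks : List (String × Int × Int)) (cnt : Int) :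
    pvLoopB ks cnt = cnt + (ks.length : Int) - ((PySem.Set.ofList ks).length : Int) := by
  generalize hn : ks.length = n
  induction n using Nat.strong_induction_on generalizing ks cnt with
  | _ n ih =>
    cases ks with
    | nil => subst hn; simp [pvLoopB]
    | cons h t =>
      have hlt : (t.filter (fun k => k != h)).length < n := by
        subst hn
        simp only [List.length_cons]
        exact Nat.lt_succ_of_le (List.length_filter_le _ _)
      rw [pvLoopB, ih _ hlt _ _ rfl, pvOfListLen, pvOfListLen, pvDistinctCons h t]
      subst hn
      have hle := List.length_filter_le (fun k => k != h) t
      have ha : ((h :: t).length : Int) = (t.length : Int) + 1 := by simp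
      push_cast
      omega

-- ===== VERDICT (by name: the statement is the Claim_ definition above) =====
theorem numDuplicates_spec : Claim_equal_numDuplicates := by
  intro name price weight _ _
  unfold Spec_numDuplicates numDuplicates numDuplicates_alt
  rw [show (PySem.Set.empty : PySem.Set (String × Int × Int)) = [] from rfl,
      ← List.foldl_map (f := fun i =>
        ((PySem.List.pyGet? name i).getD "", (PySem.List.pyGet? price i).getD 0,
         (PySem.List.pyGet? weight i).getD 0))
        (g := fun (st : PySem.Set (String × Int × Int) × Int) t =>
          if st.1.contains t then (st.1, st.2 + 1) else (PySem.Set.add st.1 t, st.2)),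
      pvFoldInv, pvLoopB_eq]
  simp [PySem.Set.update_nil_left]
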